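-- pv_equiv track=rewrite | github.com/rozwadowski/Logia-Minilogia-contest | 14.3.2.szescian.py | obok
-- ===== SOURCE A (Python) =====
-- def obok(n,p):
-- 	tab= [[[ 1+i+j*n+k*n**2 for k in range(n)]for j in range(n)] for i in range(n)]
-- 	cell = [ (i,j,k) for k in range(n)for j in range(n) for i in range(n) if tab[i][j][k]==p ][0]
--
-- 	wyniki=[]
-- 	if cell[0] < n-1:
-- 		wyniki.append(tab[cell[0]+1][cell[1]][cell[2]])
-- 	if cell[0] > 0:
-- 		wyniki.append(tab[cell[0]-1][cell[1]][cell[2]])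
-- 	if cell[1] < n-1:
-- 		wyniki.append(tab[cell[0]][cell[1]+1][cell[2]])
-- 	if cell[1] > 0:
-- 		wyniki.append(tab[cell[0]][cell[1]-1][cell[2]])
-- 	if cell[2] < n-1:
-- 		wyniki.append(tab[cell[0]][cell[1]][cell[2]+1])
-- 	if cell[2] > 0:
-- 		wyniki.append(tab[cell[0]][cell[1]][cell[2]-1])
--
-- 	wyniki.sort()
-- 	return wyniki
-- ===== SOURCE B (Python) =====
-- def obok(n, p):
--     q = p - 1
--     i = q % n
--     j = (q // n) % n
--     k = q // n**2
--     wyniki = []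
--     if k > 0:
--         wyniki.append(p - n**2)
--     if j > 0:
--         wyniki.append(p - n)
--     if i > 0:
--         wyniki.append(p - 1)
--     if i < n - 1:
--         wyniki.append(p + 1)
--     if j < n - 1:
--         wyniki.append(p + n)
--     if k < n - 1:
--         wyniki.append(p + n**2)
--     return wyniki
-- ===== Notes on version B (the rewrite author's own statement) =====
-- stated objective: faster
-- what changed: B inverts the cube numbering arithmetically (i,j,k from p via divmod) and emits the neighbors p-n^2,p-n,p-1,p+1,p+n,p+n^2 directly in increasing order, instead of materializing the n^3 table, scanning it for p, and sorting.
import Mathlib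
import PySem

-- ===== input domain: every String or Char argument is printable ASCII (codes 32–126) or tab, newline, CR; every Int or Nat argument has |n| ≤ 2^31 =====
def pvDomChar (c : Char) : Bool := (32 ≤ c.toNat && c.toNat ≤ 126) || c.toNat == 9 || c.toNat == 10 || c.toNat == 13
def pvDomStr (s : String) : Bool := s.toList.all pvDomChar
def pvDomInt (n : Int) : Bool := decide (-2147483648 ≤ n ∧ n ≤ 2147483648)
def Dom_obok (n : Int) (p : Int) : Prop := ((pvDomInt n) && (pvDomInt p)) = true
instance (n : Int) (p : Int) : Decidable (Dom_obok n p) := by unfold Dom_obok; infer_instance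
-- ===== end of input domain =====

-- B computes the cell's coordinates from p by division instead of building and scanning the n^3 table, and emits the neighbor numbers already in increasing order (no sort): O(1) vs O(n^3).

-- ===== PORT A =====
-- tab[i][j][k] lookup (indices are always in range on the admitted inputs)
def pvGet3 (tab : List (List (List Int))) (i j k : Int) : Int :=
  PySem.List.pyGetD (PySem.List.pyGetD (PySem.List.pyGetD tab i []) j []) k 0

def pvTab (n : Int) : List (List (List Int)) :=
  (PySem.List.pyRange 0 n 1).map (fun i =>
    (PySem.List.pyRange 0 n 1).map (fun j =>
      (PySem.List.pyRange 0 n 1).map (fun k => 1 + i + j * n + k * n ^ 2)))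

def pvCells (n p : Int) : List (Int × Int × Int) :=
  let tab := pvTab n
  (PySem.List.pyRange 0 n 1).flatMap (fun k =>
    (PySem.List.pyRange 0 n 1).flatMap (fun j =>
      (PySem.List.pyRange 0 n 1).flatMap (fun i =>
        if pvGet3 tab i j k = p then [(i, j, k)] else [])))

def obok (n : Int) (p : Int) : List Int :=
  match PySem.List.pyGet? (pvCells n p) 0 with
  | none => []   -- Python raises IndexError here; excluded by Pre_obok
  | some (i, j, k) =>
      PySem.List.sorted
        ((if i < n - 1 then [pvGet3 (pvTab n) (i+1) j k] else []) ++
         (if 0 < i then [pvGet3 (pvTab n) (i-1) j k] else []) ++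
         (if j < n - 1 then [pvGet3 (pvTab n) i (j+1) k] else []) ++
         (if 0 < j then [pvGet3 (pvTab n) i (j-1) k] else []) ++
         (if k < n - 1 then [pvGet3 (pvTab n) i j (k+1)] else []) ++
         (if 0 < k then [pvGet3 (pvTab n) i j (k-1)] else []))
        (fun x => x) false

-- ===== PORT B =====
def obok_alt (n : Int) (p : Int) : List Int :=
  let q := p - 1
  let i := PySem.Int.mod q n
  let j := PySem.Int.mod (PySem.Int.floordiv q n) n
  let k := PySem.Int.floordiv q (n ^ 2)
  (if 0 < k then [p - n ^ 2] else []) ++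
  (if 0 < j then [p - n] else []) ++
  (if 0 < i then [p - 1] else []) ++
  (if i < n - 1 then [p + 1] else []) ++
  (if j < n - 1 then [p + n] else []) ++
  (if k < n - 1 then [p + n ^ 2] else [])

-- ===== PRECONDITION & SPEC =====
-- Pre_obok is exactly where the Python A returns: otherwise the cell search comes up
-- empty and `[...][0]` raises IndexError.
def Pre_obok (n : Int) (p : Int) : Prop := 1 ≤ n ∧ 1 ≤ p ∧ p ≤ n ^ 3
instance (n : Int) (p : Int) : Decidable (Pre_obok n p) := by unfold Pre_obok; infer_instance
def pvWitness_obok : Int × Int := (2, 3)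

def Spec_obok (n : Int) (p : Int) (out : List Int) : Prop := out = obok_alt n p
instance (n : Int) (p : Int) (out : List Int) : Decidable (Spec_obok n p out) := by unfold Spec_obok; infer_instance

-- ===== CLAIM (what is proved, stated in full; the proofs are below) =====
def Claim_equal_obok : Prop := ∀ (n : Int) (p : Int), Dom_obok n p → Pre_obok n p → Spec_obok n p (obok n p)

-- ===== LEMMAS AND PROOFS =====

-- a flatMap over range(a,b) whose body is everywhere empty
lemma flatMap_range_nil {α : Type} (a b : Int) (f : Int → List α)
    (hf : ∀ x, a ≤ x → x < b → f x = []) :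
    (PySem.List.pyRange a b 1).flatMap f = [] := by
  by_cases hab : b ≤ a
  · rw [PySem.List.pyRange_one_eq_nil hab]; rfl
  · have hab' : a < b := by omega
    rw [PySem.List.pyRange_one_cons hab', List.flatMap_cons,
        hf a le_rfl hab', flatMap_range_nil (a+1) b f (fun x hx hx' => hf x (by omega) hx')]
    rfl
termination_by (b - a).toNat
decreasing_by omega

-- a flatMap over range(a,b) whose body is empty except at the single index c
lemma flatMap_range_single {α : Type} (a b c : Int) (L : List α) (f : Int → List α)
    (hf : ∀ x, a ≤ x → x < b → f x = if x = c then L else [])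
    (hc1 : a ≤ c) (hc2 : c < b) :
    (PySem.List.pyRange a b 1).flatMap f = L := by
  have hab : a < b := lt_of_le_of_lt hc1 hc2
  rw [PySem.List.pyRange_one_cons hab, List.flatMap_cons]
  by_cases hac : a = c
  · subst hac
    rw [hf a le_rfl hab, if_pos rfl,
        flatMap_range_nil (a+1) b f (fun x hx hx' => by
          rw [hf x (by omega) hx', if_neg (by omega)]),
        List.append_nil]
  · rw [hf a le_rfl hab, if_neg hac, List.nil_append,
        flatMap_range_single (a+1) b c L f (fun x hx hx' => hf x (by omega) hx')
          (by omega) hc2]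
termination_by (b - a).toNat
decreasing_by omega

lemma pvGet3_eq (n i j k : Int) (hi0 : 0 ≤ i) (hi1 : i < n) (hj0 : 0 ≤ j) (hj1 : j < n)
    (hk0 : 0 ≤ k) (hk1 : k < n) :
    pvGet3 (pvTab n) i j k = 1 + i + j * n + k * n ^ 2 := by
  unfold pvGet3 pvTab
  rw [PySem.List.pyGetD_map_pyRange_of_nonneg _ n i _ hi0 hi1,
      PySem.List.pyGetD_map_pyRange_of_nonneg _ n j _ hj0 hj1,
      PySem.List.pyGetD_map_pyRange_of_nonneg _ n k _ hk0 hk1]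

-- base-n digit extraction: the coordinates of cell number 1+i+j*n+k*n^2
-- base-n digit extraction: the coordinates of cell number 1+i+j*n+k*n^2
lemma digits_eq (n i j k : Int) (hn : 0 < n) (hi0 : 0 ≤ i) (hi1 : i < n)
    (hj0 : 0 ≤ j) (hj1 : j < n) (_hk0 : 0 ≤ k) (_hk1 : k < n) :
    (i + j * n + k * n ^ 2) % n = i ∧
    ((i + j * n + k * n ^ 2) / n) % n = j ∧
    (i + j * n + k * n ^ 2) / n ^ 2 = k := by
  have hne : n ≠ 0 := by omega
  have h1 : i + j * n + k * n ^ 2 = i + n * (j + k * n) := by ring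
  have h1' : i + j * n + k * n ^ 2 = i + (j + k * n) * n := by ring
  have h2 : i + j * n + k * n ^ 2 = (i + j * n) + k * n ^ 2 := by ring
  have hin : i / n = 0 := Int.ediv_eq_zero_of_lt hi0 hi1
  have him : i % n = i := Int.emod_eq_of_lt hi0 hi1
  refine ⟨?_, ?_, ?_⟩
  · rw [h1, Int.add_mul_emod_self_left i n (j + k * n), him]
  · rw [h1', Int.add_mul_ediv_right i (j + k * n) hne, hin, zero_add,
        mul_comm k n, Int.add_mul_emod_self_left j n k, Int.emod_eq_of_lt hj0 hj1]
  · have hsq : (0:Int) < n ^ 2 := by positivity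
    have hlt : i + j * n < n ^ 2 := by nlinarith
    have hge : 0 ≤ i + j * n := by positivity
    rw [h2, Int.add_mul_ediv_right _ k (by positivity : (n:Int) ^ 2 ≠ 0),
        Int.ediv_eq_zero_of_lt hge hlt, zero_add]

lemma opt_sublist {α : Type} (c : Prop) [Decidable c] (x : α) :
    List.Sublist (if c then [x] else []) [x] := by
  split
  · exact List.Sublist.refl _
  · exact List.nil_sublist _

theorem obok_eq (n p : Int) (hpre : Pre_obok n p) : obok n p = obok_alt n p := by
  obtain ⟨hn, hp1, hp2⟩ := hpre
  have hn0 : 0 < n := by omega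
  set q := p - 1 with hq
  set i0 := q % n with hi0def
  set j0 := (q / n) % n with hj0def
  set k0 := q / n ^ 2 with hk0def
  have hsq : (0:Int) < n ^ 2 := by positivity
  have hq0 : 0 ≤ q := by omega
  have hqlt : q < n ^ 3 := by omega
  have hi0 : 0 ≤ i0 := Int.emod_nonneg _ (by omega)
  have hi1 : i0 < n := Int.emod_lt_of_pos _ hn0
  have hj0 : 0 ≤ j0 := Int.emod_nonneg _ (by omega)
  have hj1 : j0 < n := Int.emod_lt_of_pos _ hn0
  have hk0' : 0 ≤ k0 := Int.ediv_nonneg hq0 (le_of_lt hsq)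
  have hk1 : k0 < n := by
    rw [hk0def, Int.ediv_lt_iff_lt_mul hsq]
    calc q < n ^ 3 := hqlt
    _ ≤ n * n ^ 2 := le_of_eq (by ring)
  -- the decomposition of q in base n
  have hdec : q = i0 + j0 * n + k0 * n ^ 2 := by
    have h1 : q % n + n * (q / n) = q := Int.emod_add_mul_ediv q n
    have h2 : (q / n) % n + n * (q / n / n) = q / n := Int.emod_add_mul_ediv (q / n) n
    have h3 : q / n / n = k0 := by
      rw [Int.ediv_ediv_of_nonneg (le_of_lt hn0), hk0def, pow_two]
    rw [← hi0def] at h1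
    rw [← hj0def] at h2
    rw [h3] at h2
    linear_combination -h1 - n * h2
  -- the cell search returns exactly (i0, j0, k0)
  have hcells : pvCells n p = [(i0, j0, k0)] := by
    unfold pvCells
    dsimp only
    apply flatMap_range_single 0 n k0 _ _ ?_ hk0' hk1
    intro k hk hk'
    by_cases hkk : k = k0
    · subst hkk
      rw [if_pos rfl]
      apply flatMap_range_single 0 n j0 _ _ ?_ hj0 hj1
      intro j hj hj'
      by_cases hjj : j = j0
      · subst hjj
        rw [if_pos rfl]
        apply flatMap_range_single 0 n i0 _ _ ?_ hi0 hi1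
        intro i hi hi'
        rw [pvGet3_eq n i j0 k0 hi hi' hj0 hj1 hk0' hk1]
        by_cases hii : i = i0
        · subst hii; rw [if_pos (by omega), if_pos rfl]
        · rw [if_neg (by omega), if_neg hii]
      · rw [if_neg hjj]
        apply flatMap_range_nil
        intro i hi hi'
        rw [pvGet3_eq n i j k0 hi hi' hj hj' hk0' hk1, if_neg]
        intro hcontra
        have d1 := (digits_eq n i j k0 hn0 hi hi' hj hj' hk0' hk1).2.1
        have d2 := (digits_eq n i0 j0 k0 hn0 hi0 hi1 hj0 hj1 hk0' hk1).2.1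
        have heq : i + j * n + k0 * n ^ 2 = i0 + j0 * n + k0 * n ^ 2 := by
          linarith [hcontra, hdec]
        apply hjj
        calc j = (i + j * n + k0 * n ^ 2) / n % n := d1.symm
        _ = (i0 + j0 * n + k0 * n ^ 2) / n % n := by rw [heq]
        _ = j0 := d2
    · rw [if_neg hkk]
      apply flatMap_range_nil
      intro j hj hj'
      apply flatMap_range_nil
      intro i hi hi'
      rw [pvGet3_eq n i j k hi hi' hj hj' hk hk', if_neg]
      intro hcontra
      have d1 := (digits_eq n i j k hn0 hi hi' hj hj' hk hk').2.2
      have d2 := (digits_eq n i0 j0 k0 hn0 hi0 hi1 hj0 hj1 hk0' hk1).2.2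
      have heq : i + j * n + k * n ^ 2 = i0 + j0 * n + k0 * n ^ 2 := by
        linarith [hcontra, hdec]
      apply hkk
      calc k = (i + j * n + k * n ^ 2) / n ^ 2 := d1.symm
      _ = (i0 + j0 * n + k0 * n ^ 2) / n ^ 2 := by rw [heq]
      _ = k0 := d2
  -- evaluate port A at the found cell
  unfold obok
  rw [hcells, PySem.List.pyGet?_zero_cons]
  -- neighbor values
  have e1 : (if i0 < n - 1 then [pvGet3 (pvTab n) (i0+1) j0 k0] else []) =
      (if i0 < n - 1 then [p + 1] else []) := by
    split
    · rw [pvGet3_eq n (i0+1) j0 k0 (by omega) (by omega) hj0 hj1 hk0' hk1]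
      congr 1; linear_combination hq - hdec
    · rfl
  have e2 : (if 0 < i0 then [pvGet3 (pvTab n) (i0-1) j0 k0] else []) =
      (if 0 < i0 then [p - 1] else []) := by
    split
    · rw [pvGet3_eq n (i0-1) j0 k0 (by omega) (by omega) hj0 hj1 hk0' hk1]
      congr 1; linear_combination hq - hdec
    · rfl
  have e3 : (if j0 < n - 1 then [pvGet3 (pvTab n) i0 (j0+1) k0] else []) =
      (if j0 < n - 1 then [p + n] else []) := by
    split
    · rw [pvGet3_eq n i0 (j0+1) k0 hi0 hi1 (by omega) (by omega) hk0' hk1]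
      congr 1; linear_combination hq - hdec
    · rfl
  have e4 : (if 0 < j0 then [pvGet3 (pvTab n) i0 (j0-1) k0] else []) =
      (if 0 < j0 then [p - n] else []) := by
    split
    · rw [pvGet3_eq n i0 (j0-1) k0 hi0 hi1 (by omega) (by omega) hk0' hk1]
      congr 1; linear_combination hq - hdec
    · rfl
  have e5 : (if k0 < n - 1 then [pvGet3 (pvTab n) i0 j0 (k0+1)] else []) =
      (if k0 < n - 1 then [p + n ^ 2] else []) := by
    split
    · rw [pvGet3_eq n i0 j0 (k0+1) hi0 hi1 hj0 hj1 (by omega) (by omega)]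
      congr 1; linear_combination hq - hdec
    · rfl
  have e6 : (if 0 < k0 then [pvGet3 (pvTab n) i0 j0 (k0-1)] else []) =
      (if 0 < k0 then [p - n ^ 2] else []) := by
    split
    · rw [pvGet3_eq n i0 j0 (k0-1) hi0 hi1 hj0 hj1 (by omega) (by omega)]
      congr 1; linear_combination hq - hdec
    · rfl
  dsimp only
  rw [e1, e2, e3, e4, e5, e6]
  -- evaluate port B
  have halt : obok_alt n p =
      (if 0 < k0 then [p - n ^ 2] else []) ++
      (if 0 < j0 then [p - n] else []) ++
      (if 0 < i0 then [p - 1] else []) ++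
      (if i0 < n - 1 then [p + 1] else []) ++
      (if j0 < n - 1 then [p + n] else []) ++
      (if k0 < n - 1 then [p + n ^ 2] else []) := by
    unfold obok_alt
    simp only [PySem.Int.mod_eq_emod_of_pos hn0, PySem.Int.floordiv_eq_ediv_of_pos hn0,
        PySem.Int.floordiv_eq_ediv_of_pos hsq]
    rfl
  rw [halt]
  -- sorted(A's bag) is B's list: same multiset, B's already strictly increasing
  apply PySem.List.sorted_eq_of_perm_of_pairwise_lt
  · -- permutation of the six optional blocks
    rw [← Multiset.coe_eq_coe]
    simp only [← Multiset.coe_add]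
    abel
  · -- B's list is strictly increasing: a sublist of the full increasing neighbor list
    by_cases hn1 : n = 1
    · subst hn1
      simp only [show i0 = 0 from by omega, show j0 = 0 from by omega,
        show k0 = 0 from by omega]
      norm_num
    · have hn2 : 2 ≤ n := by omega
      have hnn : n < n ^ 2 := by nlinarith
      have hsubl : List.Sublist ((if 0 < k0 then [p - n ^ 2] else []) ++
          (if 0 < j0 then [p - n] else []) ++
          (if 0 < i0 then [p - 1] else []) ++
          (if i0 < n - 1 then [p + 1] else []) ++
          (if j0 < n - 1 then [p + n] else []) ++
          (if k0 < n - 1 then [p + n ^ 2] else []))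
          ([p - n ^ 2] ++ [p - n] ++ [p - 1] ++ [p + 1] ++ [p + n] ++ [p + n ^ 2]) :=
        (((((opt_sublist _ _).append (opt_sublist _ _)).append
          (opt_sublist _ _)).append (opt_sublist _ _)).append
          (opt_sublist _ _)).append (opt_sublist _ _)
      refine List.Pairwise.sublist hsubl ?_
      simp only [List.cons_append, List.nil_append]
      simp only [List.pairwise_cons, List.mem_cons, List.not_mem_nil,
        forall_eq_or_imp, IsEmpty.forall_iff, implies_true, and_true]
      exact ⟨by omega, by omega, by omega, by omega, by omega, trivial, List.Pairwise.nil⟩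
-- ===== VERDICT (by name: the statement is the Claim_ definition above) =====
theorem obok_spec : Claim_equal_obok := by
  intro n p _ hpre
  exact obok_eq n p hpre
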